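-- pv_equiv track=rewrite | github.com/bornkesselpascal/university | python/gdp-python/Klausurvorbereitung/Last-Minute-Klausurvorbereitung/6c.py | wortumkehr
-- ===== SOURCE A (Python) =====
-- def wortumkehr(wort):
--     i = 0
--     while i < len(wort):
--         if not wort[i].isalpha():
--             i+=1
--             continue
--
--         j = i+1
--         while j < len(wort) and wort[j].isalpha():
--             j+=1
--
--         wort = wort[:i] + wort[i:j][::-1] + wort[j:]
--
--         i = j
--
--     return wort
-- ===== SOURCE B (Python) =====
-- def wortumkehr(wort):
--     out = []
--     run = []
--     for ch in wort:
--         if ch.isalpha():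
--             run.append(ch)
--         else:
--             out.extend(reversed(run))
--             run = []
--             out.append(ch)
--     out.extend(reversed(run))
--     return ''.join(out)
-- ===== Notes on version B (the rewrite author's own statement) =====
-- stated objective: simpler
-- what changed: Single left-to-right pass that accumulates the current alphabetic run and flushes it reversed at each non-letter (and at the end), instead of A's two-level index scanning that repeatedly rebuilds the whole string from three slices.
import Mathlib
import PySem

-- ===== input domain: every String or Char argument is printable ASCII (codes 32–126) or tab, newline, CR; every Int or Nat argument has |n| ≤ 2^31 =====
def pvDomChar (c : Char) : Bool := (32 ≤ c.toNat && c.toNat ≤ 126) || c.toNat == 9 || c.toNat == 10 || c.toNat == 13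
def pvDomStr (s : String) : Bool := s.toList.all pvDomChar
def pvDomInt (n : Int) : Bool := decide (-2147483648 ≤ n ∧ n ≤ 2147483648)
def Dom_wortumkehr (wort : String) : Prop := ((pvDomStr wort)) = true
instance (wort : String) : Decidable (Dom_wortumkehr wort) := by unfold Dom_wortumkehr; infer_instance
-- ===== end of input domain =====

-- B reverses each maximal alphabetic run in one pass with a run accumulator, instead of
-- A's index scanning that rebuilds the whole string from three slices at each run.

-- ===== PORT A =====

-- inner 'while j < len(wort) and wort[j].isalpha(): j += 1' (nested if = the short-circuit 'and')
def wortumkehrJ (w : List Char) (j : Nat) : Nat :=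
  if h : j < w.length then
    if PySem.Chars.isalpha w[j] then wortumkehrJ w (j + 1) else j
  else j
termination_by w.length - j
decreasing_by omega

-- the port's termination cites these two facts about the inner loop
theorem wortumkehrJ_ge (w : List Char) (j : Nat) : j ≤ wortumkehrJ w j := by
  induction j using wortumkehrJ.induct w with
  | case1 j h ha ih => rw [wortumkehrJ, dif_pos h, if_pos ha]; omega
  | case2 j h ha => rw [wortumkehrJ, dif_pos h, if_neg ha]
  | case3 j h => rw [wortumkehrJ, dif_neg h]

theorem wortumkehrJ_le (w : List Char) (j : Nat) (hj : j ≤ w.length) :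
    wortumkehrJ w j ≤ w.length := by
  induction j using wortumkehrJ.induct w with
  | case1 j h ha ih => rw [wortumkehrJ, dif_pos h, if_pos ha]; exact ih (by omega)
  | case2 j h ha => rw [wortumkehrJ, dif_pos h, if_neg ha]; exact hj
  | case3 j h => rw [wortumkehrJ, dif_neg h]; exact hj

-- length of 'wort[:i] + wort[i:j][::-1] + wort[j:]' (also cited by the port's termination)
theorem wortumkehrLen (w : List Char) (i j : Nat) (hij : i ≤ j) (hj : j ≤ w.length) :
    (PySem.List.slice w none (some (i : Int)) ++
      (PySem.List.slice w (some (i : Int)) (some (j : Int))).reverse ++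
      PySem.List.slice w (some (j : Int)) none).length = w.length := by
  simp [PySem.List.slice_to_natCast, PySem.List.slice_natCast, PySem.List.slice_from_natCast]
  omega

-- outer 'while i < len(wort)' loop; the string is rebuilt from slices exactly as in A
def wortumkehrLoop (w : List Char) (i : Nat) : List Char :=
  if h : i < w.length then
    if ¬ PySem.Chars.isalpha w[i] = true then
      wortumkehrLoop w (i + 1)
    else
      let j := wortumkehrJ w (i + 1)
      wortumkehrLoop
        (PySem.List.slice w none (some (i : Int)) ++
          (PySem.List.slice w (some (i : Int)) (some (j : Int))).reverse ++
          PySem.List.slice w (some (j : Int)) none) j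
  else w
termination_by w.length - i
decreasing_by
  · omega
  · have h1 : i + 1 ≤ wortumkehrJ w (i + 1) := wortumkehrJ_ge w (i + 1)
    have h2 : wortumkehrJ w (i + 1) ≤ w.length := wortumkehrJ_le w (i + 1) (by omega)
    rw [wortumkehrLen w i (wortumkehrJ w (i + 1)) (by omega) h2]
    omega

def wortumkehr (wort : String) : String := String.ofList (wortumkehrLoop wort.toList 0)

-- ===== PORT B =====

-- the for-loop of Source B: out = collected output, run = pending alphabetic run
def wortumkehrGo (out run : List Char) : List Char → List Char
  | [] => out ++ run.reverse
  | c :: cs =>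
      if PySem.Chars.isalpha c then wortumkehrGo out (run ++ [c]) cs
      else wortumkehrGo (out ++ run.reverse ++ [c]) [] cs

def wortumkehr_alt (wort : String) : String := String.ofList (wortumkehrGo [] [] wort.toList)

-- ===== PRECONDITION & SPEC =====
def Spec_wortumkehr (wort : String) (out : String) : Prop := out = wortumkehr_alt wort
instance (wort : String) (out : String) : Decidable (Spec_wortumkehr wort out) := by unfold Spec_wortumkehr; infer_instance

-- ===== CLAIM (what is proved, stated in full; the proofs are below) =====
def Claim_equal_wortumkehr : Prop := ∀ (wort : String), Dom_wortumkehr wort → Spec_wortumkehr wort (wortumkehr wort)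

-- ===== LEMMAS AND PROOFS =====

-- common characterisation: reverse each maximal alphabetic run
def wortProc : List Char → List Char
  | [] => []
  | c :: cs =>
      if _h : PySem.Chars.isalpha c = true then
        ((c :: cs).takeWhile (PySem.Chars.isalpha ·)).reverse ++
          wortProc ((c :: cs).dropWhile (PySem.Chars.isalpha ·))
      else c :: wortProc cs
termination_by xs => xs.length
decreasing_by
  · simp [List.dropWhile, _h]
    exact List.length_dropWhile_le _ _
  · simp

theorem wortProc_eq (cs : List Char) :
    wortProc cs = (cs.takeWhile (PySem.Chars.isalpha ·)).reverse ++
      wortProc (cs.dropWhile (PySem.Chars.isalpha ·)) := by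
  cases cs with
  | nil => simp [wortProc]
  | cons c cs =>
    by_cases h : PySem.Chars.isalpha c = true
    · rw [wortProc, dif_pos h]
    · rw [List.takeWhile_cons_of_neg (by simpa using h),
        List.dropWhile_cons_of_neg (by simpa using h)]
      simp

theorem wortumkehrJ_spec (w : List Char) (j : Nat) (hj : j ≤ w.length) :
    wortumkehrJ w j = j + ((w.drop j).takeWhile (PySem.Chars.isalpha ·)).length := by
  induction j using wortumkehrJ.induct w with
  | case1 j h ha ih =>
    rw [wortumkehrJ, dif_pos h, if_pos ha]
    rw [ih (by omega)]
    have hd : w.drop j = w[j] :: w.drop (j + 1) := (List.getElem_cons_drop h).symm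
    rw [hd, List.takeWhile_cons_of_pos (by simpa using ha)]
    simp; omega
  | case2 j h ha =>
    rw [wortumkehrJ, dif_pos h, if_neg ha]
    have hd : w.drop j = w[j] :: w.drop (j + 1) := (List.getElem_cons_drop h).symm
    rw [hd, List.takeWhile_cons_of_neg (by simpa using ha)]
    simp
  | case3 j h =>
    rw [wortumkehrJ, dif_neg h]
    rw [List.drop_eq_nil_of_le (by omega)]; simp

theorem wortumkehrLoop_spec (w : List Char) (i : Nat) (hi : i ≤ w.length) :
    wortumkehrLoop w i = w.take i ++ wortProc (w.drop i) := by
  induction w, i using wortumkehrLoop.induct with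
  | case1 w i h hna ih =>
    rw [wortumkehrLoop, dif_pos h, if_pos hna]
    rw [ih (by omega)]
    have hd : w.drop i = w[i] :: w.drop (i + 1) := (List.getElem_cons_drop h).symm
    rw [hd, wortProc, dif_neg (by simpa using hna)]
    have ht : w.take (i + 1) = w.take i ++ [w[i]] := by
      rw [List.take_add_one, List.getElem?_eq_getElem h]; simp
    rw [ht, List.append_assoc, List.singleton_append]
  | case2 w i h hna j ih =>
    rw [wortumkehrLoop, dif_pos h, if_neg hna]
    simp only [not_not] at hna
    have hjdef : j = wortumkehrJ w (i + 1) := rfl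
    have hd : w.drop i = w[i] :: w.drop (i + 1) := (List.getElem_cons_drop h).symm
    have htw : (w.drop i).takeWhile (PySem.Chars.isalpha ·) =
        w[i] :: (w.drop (i + 1)).takeWhile (PySem.Chars.isalpha ·) := by
      rw [hd, List.takeWhile_cons_of_pos (by simpa using hna)]
    have hjv : j = i + ((w.drop i).takeWhile (PySem.Chars.isalpha ·)).length := by
      have hs := wortumkehrJ_spec w (i + 1) (by omega)
      rw [hjdef, hs, htw, List.length_cons]
      omega
    have hj2 : j ≤ w.length := wortumkehrJ_le w (i + 1) (by omega)
    have hij : i + 1 ≤ j := wortumkehrJ_ge w (i + 1)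
    have hslice : PySem.List.slice w none (some (i : Int)) = w.take i :=
      PySem.List.slice_to_natCast w i
    have hseg : PySem.List.slice w (some (i : Int)) (some (j : Int)) =
        (w.drop i).takeWhile (PySem.Chars.isalpha ·) := by
      rw [PySem.List.slice_natCast]
      have hpre : (w.drop i).takeWhile (PySem.Chars.isalpha ·) <+: w.drop i :=
        List.takeWhile_prefix _
      rw [hjv]
      have h3 : i + ((w.drop i).takeWhile (PySem.Chars.isalpha ·)).length - i =
          ((w.drop i).takeWhile (PySem.Chars.isalpha ·)).length := by omega
      rw [h3, ← List.prefix_iff_eq_take.mp hpre]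
    have hrest : PySem.List.slice w (some (j : Int)) none = w.drop j :=
      PySem.List.slice_from_natCast w j
    rw [ih (by rw [wortumkehrLen w i j (by omega) hj2]; exact hj2)]
    rw [hslice, hseg, hrest]
    have hlen : (w.take i ++ ((w.drop i).takeWhile (PySem.Chars.isalpha ·)).reverse).length = j := by
      simp [hjv]; omega
    rw [List.take_left' hlen, List.drop_left' hlen]
    have hdw : w.drop j = (w.drop i).dropWhile (PySem.Chars.isalpha ·) := by
      have hsplit : w.drop i = (w.drop i).takeWhile (PySem.Chars.isalpha ·) ++
          (w.drop i).dropWhile (PySem.Chars.isalpha ·) := (List.takeWhile_append_dropWhile).symm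
      have h4 : w.drop j = (w.drop i).drop (j - i) := by rw [List.drop_drop]; congr 1; omega
      have h5 : j - i = ((w.drop i).takeWhile (PySem.Chars.isalpha ·)).length := by omega
      rw [h4, h5]
      generalize List.takeWhile (fun x => PySem.Chars.isalpha x) (w.drop i) = t at hsplit ⊢
      generalize List.dropWhile (fun x => PySem.Chars.isalpha x) (w.drop i) = d at hsplit ⊢
      rw [hsplit, List.drop_left]
    rw [hdw, List.append_assoc, ← wortProc_eq (w.drop i)]
  | case3 w i h =>
    rw [wortumkehrLoop, dif_neg h]
    rw [List.take_of_length_le (by omega), List.drop_eq_nil_of_le (by omega)]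
    simp [wortProc]

theorem wortumkehrGo_spec (cs out run : List Char) :
    wortumkehrGo out run cs = out ++ (run ++ cs.takeWhile (PySem.Chars.isalpha ·)).reverse ++
      wortProc (cs.dropWhile (PySem.Chars.isalpha ·)) := by
  induction cs generalizing out run with
  | nil => simp [wortumkehrGo, wortProc]
  | cons c cs ih =>
    by_cases h : PySem.Chars.isalpha c = true
    · rw [wortumkehrGo, if_pos h, ih]
      rw [List.takeWhile_cons_of_pos (by simpa using h),
        List.dropWhile_cons_of_pos (by simpa using h)]
      simp
    · rw [wortumkehrGo, if_neg h, ih]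
      rw [List.takeWhile_cons_of_neg (by simpa using h),
        List.dropWhile_cons_of_neg (by simpa using h)]
      rw [wortProc, dif_neg h, wortProc_eq cs]
      simp

-- ===== VERDICT (by name: the statement is the Claim_ definition above) =====
theorem wortumkehr_spec : Claim_equal_wortumkehr := by
  intro wort _
  unfold Spec_wortumkehr wortumkehr wortumkehr_alt
  rw [wortumkehrLoop_spec wort.toList 0 (by omega), wortumkehrGo_spec]
  conv_lhs => rw [List.take_zero, List.drop_zero, wortProc_eq wort.toList]
  simp
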